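-- pv_equiv track=rewrite | github.com/Dashtikh/LZ77 | lz78.py | decoder78
-- ===== SOURCE A (Python) =====
-- def decoder78(code):
--     code = code.replace("<", "")
--     code = code.replace(">", "")
--     code = code.replace(",", "")
--     decode = ""
--     counter = 0
--     decode = [""]
--     decodestring = ""
--     start = 0
--
--     while counter < len(code):
--         if code[counter] == "0":
--             decode.append(code[counter + 1])
--             counter = counter + 2
--         else:
--             decode.append(decode[int(code[counter])] + code[counter + 1])
--             counter = counter + 2
--     for letter in decode:
--         decodestring = decodestring + letter
--     return decodestring
-- ===== SOURCE B (Python) =====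
-- def decoder78(code):
--     s = code.replace("<", "").replace(">", "").replace(",", "")
--     # dictionary as parent-pointer entries: entry j+1 = (parent index, char)
--     entries = []
--     for i in range(0, len(s), 2):
--         entries.append((int(s[i]), s[i + 1]))
--
--     def build(k):
--         # reconstruct entry k's string by following parent links to the root
--         chars = []
--         while k:
--             p, c = entries[k - 1]
--             chars.append(c)
--             k = p
--         return "".join(reversed(chars))
--
--     return "".join(build(j) for j in range(1, len(entries) + 1))
-- ===== Notes on version B (the rewrite author's own statement) =====
-- stated objective: alternative
-- what changed: B stores the LZ78 dictionary as parent-pointer entries (parent index, char) instead of fully built strings, and emits the output by walking each entry's parent chain back to the root.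
import Mathlib
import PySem

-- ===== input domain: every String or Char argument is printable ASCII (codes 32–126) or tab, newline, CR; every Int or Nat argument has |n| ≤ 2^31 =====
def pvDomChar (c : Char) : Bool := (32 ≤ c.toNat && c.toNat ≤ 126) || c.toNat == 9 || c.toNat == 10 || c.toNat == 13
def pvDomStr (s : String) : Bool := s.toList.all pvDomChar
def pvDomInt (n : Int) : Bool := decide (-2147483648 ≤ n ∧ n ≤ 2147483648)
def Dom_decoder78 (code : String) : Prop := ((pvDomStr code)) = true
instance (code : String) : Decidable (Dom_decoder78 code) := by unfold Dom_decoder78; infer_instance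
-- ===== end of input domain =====

-- B replaces A's dictionary of built strings by parent-pointer entries (parent index, char)
-- and rebuilds each entry's string by following parent links; return values proved equal on Pre_.

-- ===== PORT A =====
-- int(code[counter]) for a digit character (Pre_ guarantees the char is a digit)
def pvDigit (c : Char) : Nat := c.toNat - 48

-- the while loop of A: consume two characters per step, appending to the decode list
def pvLoopA : List Char → List String → List String
  | c :: d :: rest, dec =>
      if c = '0' then
        pvLoopA rest (dec ++ [String.ofList [d]])
      else
        -- decode[int(code[counter])] + code[counter+1]; Pre_ keeps the index in range
        pvLoopA rest (dec ++ [dec.getD (pvDigit c) "" ++ String.ofList [d]])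
  | _, dec => dec   -- counter ≥ len(code); a lone trailing char raises in Python (outside Pre_)

def decoder78 (code : String) : String :=
  let code := PySem.Str.replace code "<" ""
  let code := PySem.Str.replace code ">" ""
  let code := PySem.Str.replace code "," ""
  let decode := pvLoopA code.toList [""]
  decode.foldl (fun decodestring letter => decodestring ++ letter) ""

-- ===== PORT B =====
-- entries: entry j+1 of the dictionary is (parent index, char)
def pvParse : List Char → List (Nat × Char)
  | c :: d :: rest => (pvDigit c, d) :: pvParse rest
  | _ => []

-- build(k): follow parent links back to the root, collecting characters
def pvBuild (E : List (Nat × Char)) : Nat → List Char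
  | 0 => []
  | k + 1 =>
      match E[k]? with
      | none => []
      | some pc => (if _h : pc.1 ≤ k then pvBuild E pc.1 else []) ++ [pc.2]
  termination_by k => k
  decreasing_by omega

def decoder78_alt (code : String) : String :=
  let s := PySem.Str.replace (PySem.Str.replace (PySem.Str.replace code "<" "") ">" "") "," ""
  let E := pvParse s.toList
  String.ofList ((List.range E.length).map (fun j => pvBuild E (j + 1))).flatten

-- ===== PRECONDITION & SPEC =====
-- valid token list: even length, each index char a digit referring to an already-built entry
def pvPreList : List Char → Nat → Bool
  | [], _ => true
  | [_], _ => false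
  | c :: _ :: rest, k => c.isDigit && pvDigit c ≤ k && pvPreList rest (k + 1)

-- Pre_ is exactly where Python A returns: it excludes an odd stripped length (IndexError on
-- code[counter+1]), a non-digit index character (ValueError in int()) and a reference to a
-- not-yet-built entry (IndexError on decode[...]).
def Pre_decoder78 (code : String) : Prop :=
  pvPreList (PySem.Str.replace (PySem.Str.replace (PySem.Str.replace code "<" "") ">" "") "," "").toList 0 = true
instance (code : String) : Decidable (Pre_decoder78 code) := by unfold Pre_decoder78; infer_instance

def pvWitness_decoder78 : String := "<0,a><1,b>"

def Spec_decoder78 (code : String) (out : String) : Prop := out = decoder78_alt code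
instance (code : String) (out : String) : Decidable (Spec_decoder78 code out) := by unfold Spec_decoder78; infer_instance

-- ===== CLAIM (what is proved, stated in full; the proofs are below) =====
def Claim_equal_decoder78 : Prop := ∀ (code : String), Dom_decoder78 code → Pre_decoder78 code → Spec_decoder78 code (decoder78 code)

-- ===== LEMMAS AND PROOFS =====

-- pvBuild only looks at entries below its index: appending entries does not change it
theorem pvBuild_append (E E' : List (Nat × Char)) : ∀ (k : Nat), k ≤ E.length →
    pvBuild (E ++ E') k = pvBuild E k := by
  intro k
  induction k using Nat.strong_induction_on with
  | _ k ih =>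
    cases k with
    | zero => intro _; simp [pvBuild]
    | succ k =>
      intro hk
      have hlt : k < E.length := by omega
      rw [pvBuild, pvBuild, List.getElem?_append_left hlt]
      cases hE : E[k]? with
      | none => rfl
      | some pc =>
        obtain ⟨p, ch⟩ := pc
        dsimp only
        by_cases hp : p ≤ k
        · rw [dif_pos hp, dif_pos hp, ih p (by omega) (by omega)]
        · rw [dif_neg hp, dif_neg hp]

theorem pvString_mk_append (a b : List Char) : String.ofList a ++ String.ofList b = String.ofList (a ++ b) := by
  apply String.toList_inj.mp; simp

-- the main loop invariant: A's decode list is the point-by-point rebuild of B's entry list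
theorem pvLoop_inv : ∀ (cs : List Char) (E0 : List (Nat × Char)),
    pvPreList cs E0.length = true →
    pvLoopA cs ((List.range (E0.length + 1)).map (fun j => String.ofList (pvBuild E0 j)))
      = (List.range ((E0 ++ pvParse cs).length + 1)).map
          (fun j => String.ofList (pvBuild (E0 ++ pvParse cs) j)) := by
  intro cs
  induction cs using pvParse.induct with
  | case1 c d rest ih =>
    intro E0 hpre
    simp only [pvPreList, Bool.and_eq_true, decide_eq_true_eq] at hpre
    obtain ⟨⟨hdig, hle⟩, hrest⟩ := hpre
    have hset : (E0 ++ [(pvDigit c, d)]) ++ pvParse rest = E0 ++ pvParse (c :: d :: rest) := by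
      simp [pvParse]
    have hlen : (E0 ++ [(pvDigit c, d)]).length = E0.length + 1 := by simp
    -- the appended element equals B's rebuild of the new entry
    have hnewv : String.ofList (pvBuild (E0 ++ [(pvDigit c, d)]) (E0.length + 1))
        = (if c = '0' then String.ofList [d]
           else ((List.range (E0.length + 1)).map (fun j => String.ofList (pvBuild E0 j))).getD (pvDigit c) "" ++ String.ofList [d]) := by
      have hb : pvBuild (E0 ++ [(pvDigit c, d)]) (E0.length + 1)
          = pvBuild E0 (pvDigit c) ++ [d] := by
        rw [pvBuild]
        have : (E0 ++ [(pvDigit c, d)])[E0.length]? = some (pvDigit c, d) := by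
          simp
        rw [this]
        dsimp only
        rw [dif_pos hle, pvBuild_append _ _ _ hle]
      rw [hb]
      by_cases h0 : c = '0'
      · have hd0 : pvDigit c = 0 := by subst h0; rfl
        rw [if_pos h0, hd0]
        simp [pvBuild]
      · rw [if_neg h0]
        have hgd : ((List.range (E0.length + 1)).map (fun j => String.ofList (pvBuild E0 j))).getD (pvDigit c) ""
            = String.ofList (pvBuild E0 (pvDigit c)) := by
          rw [List.getD_eq_getElem?_getD]
          rw [List.getElem?_map, List.getElem?_range (by omega)]
          rfl
        rw [hgd, pvString_mk_append]
    have hmapeq : (List.range (E0.length + 1)).map (fun j => String.ofList (pvBuild (E0 ++ [(pvDigit c, d)]) j))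
        = (List.range (E0.length + 1)).map (fun j => String.ofList (pvBuild E0 j)) := by
      apply List.map_congr_left
      intro j hj
      simp only [List.mem_range] at hj
      rw [pvBuild_append _ _ j (by omega)]
    -- step the A-loop once, in either branch
    have hstep : pvLoopA (c :: d :: rest) ((List.range (E0.length + 1)).map (fun j => String.ofList (pvBuild E0 j)))
        = pvLoopA rest ((List.range ((E0 ++ [(pvDigit c, d)]).length + 1)).map
            (fun j => String.ofList (pvBuild (E0 ++ [(pvDigit c, d)]) j))) := by
      have hdec : (List.range ((E0 ++ [(pvDigit c, d)]).length + 1)).map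
            (fun j => String.ofList (pvBuild (E0 ++ [(pvDigit c, d)]) j))
          = (List.range (E0.length + 1)).map (fun j => String.ofList (pvBuild E0 j))
            ++ [String.ofList (pvBuild (E0 ++ [(pvDigit c, d)]) (E0.length + 1))] := by
        rw [hlen, List.range_succ, List.map_append, hmapeq, List.map_singleton]
      by_cases h0 : c = '0'
      · rw [pvLoopA, if_pos h0, hdec, hnewv, if_pos h0]
      · rw [pvLoopA, if_neg h0, hdec, hnewv, if_neg h0]
    rw [hstep, ih _ (by rw [hlen]; exact hrest), hset]
  | case2 cs hshape =>
    intro E0 hpre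
    cases cs with
    | nil => simp [pvLoopA, pvParse]
    | cons c tl =>
      cases tl with
      | nil => simp [pvPreList] at hpre
      | cons d rest => exact (hshape c d rest rfl).elim

-- folding string concatenation over the built pieces is the flattened character list
theorem pvFold_mk (L : List (List Char)) : ∀ (a : String),
    (L.map String.ofList).foldl (fun x y => x ++ y) a = a ++ String.ofList L.flatten := by
  induction L with
  | nil =>
    intro a
    simp only [List.map_nil, List.foldl_nil, List.flatten_nil]
    apply String.toList_inj.mp; simp
  | cons l L ih =>
    intro a
    simp only [List.map_cons, List.foldl_cons, List.flatten_cons, ih]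
    rw [String.append_assoc, ← String.ofList_append]

-- ===== VERDICT (by name: the statement is the Claim_ definition above) =====
theorem decoder78_spec : Claim_equal_decoder78 := by
  intro code _hdom hpre
  unfold Pre_decoder78 at hpre
  unfold Spec_decoder78 decoder78 decoder78_alt
  dsimp only
  set s := PySem.Str.replace (PySem.Str.replace (PySem.Str.replace code "<" "") ">" "") "," "" with hs
  have h0 : ([""] : List String) = (List.range ((0 : Nat) + 1)).map
      (fun j => String.ofList (pvBuild ([] : List (Nat × Char)) j)) := by
    simp [pvBuild]
  have hinv := pvLoop_inv s.toList [] hpre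
  simp only [List.length_nil, List.nil_append] at hinv
  rw [h0, hinv]
  set E := pvParse s.toList with hE
  have hmm : (List.range (E.length + 1)).map (fun j => String.ofList (pvBuild E j))
      = ((List.range (E.length + 1)).map (fun j => pvBuild E j)).map String.ofList := by
    rw [List.map_map]; rfl
  rw [hmm, pvFold_mk]
  have hsp : (List.range (E.length + 1)).map (fun j => pvBuild E j)
      = [] :: (List.range E.length).map (fun j => pvBuild E (j + 1)) := by
    rw [List.range_succ_eq_map, List.map_cons, List.map_map]
    simp [pvBuild, Function.comp]
  rw [hsp]
  simp
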